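-- pv_equiv track=rewrite | github.com/ohlcv/smoothstack | backup/cli-migration/tools/container_deps_manager.py | optimize_dockerfile_content
-- ===== SOURCE A (Python) =====
-- def optimize_dockerfile_content(content: str, component: str) -> str:
--     """优化Dockerfile内容
--
--     Args:
--         content (str): 原始Dockerfile内容
--         component (str): 组件类型 (frontend 或 backend)
--
--     Returns:
--         str: 优化后的Dockerfile内容
--     """
--     # 1. 合并RUN命令减少层数
--     lines = content.splitlines()
--     optimized_lines = []
--     i = 0
--
--     while i < len(lines):
--         line = lines[i].strip()
--
--         # 处理连续的RUN命令
--         if line.startswith("RUN"):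
--             run_commands = [line[4:].strip()]
--             j = i + 1
--
--             # 查找连续的RUN命令
--             while j < len(lines) and lines[j].strip().startswith("RUN"):
--                 run_commands.append(lines[j].strip()[4:].strip())
--                 j += 1
--
--             # 如果有多个连续的RUN，合并它们
--             if len(run_commands) > 1:
--                 merged_run = "RUN " + " && \\\n    ".join(run_commands)
--                 optimized_lines.append(merged_run)
--                 i = j
--             else:
--                 optimized_lines.append(line)
--                 i += 1
--         else:
--             optimized_lines.append(line)
--             i += 1
--
--     # 2. 添加.dockerignore建议
--     dockerignore_suggestion = """
-- # 推荐的.dockerignore配置: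
-- # .git
-- # node_modules
-- # npm-debug.log
-- # Dockerfile
-- # .dockerignore
-- # .env
-- # .env.*
-- # *.md
-- # .vscode
-- # .idea
-- """
--
--     # 3. 针对不同组件添加特定优化
--     if component == "frontend":
--         # 前端特定优化
--         optimized_content = "\n".join(optimized_lines)
--         # 确保使用缓存优化
--         if "npm ci" in optimized_content and "--cache-folder" not in optimized_content:
--             optimized_content = optimized_content.replace(
--                 "npm ci", "npm ci --cache /npm-cache"
--             )
--         # 添加缓存清理
--         if (
--             "npm ci" in optimized_content
--             and "rm -rf /root/.npm" not in optimized_content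
--         ):
--             optimized_content = optimized_content.replace(
--                 "npm ci", "npm ci && rm -rf /root/.npm"
--             )
--     else:
--         # 后端特定优化
--         optimized_content = "\n".join(optimized_lines)
--         # 添加pip缓存清理
--         if (
--             "pip install" in optimized_content
--             and "rm -rf /root/.cache/pip" not in optimized_content
--         ):
--             optimized_content = optimized_content.replace(
--                 "pip install", "pip install --no-cache-dir"
--             )
--         # 确保使用最小基础镜像
--         if "python:3.9" in optimized_content and "slim" not in optimized_content:
--             optimized_content = optimized_content.replace(
--                 "python:3.9", "python:3.9-slim"
--             )
--
--     # 添加注释说明优化内容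
--     header_comment = """# 优化的Dockerfile
-- # 已应用以下优化:
-- # 1. 合并RUN命令减少层数
-- # 2. 优化缓存使用
-- # 3. 清理构建缓存
-- # 4. 使用最小基础镜像
-- """
--
--     return header_comment + optimized_content + dockerignore_suggestion
-- ===== SOURCE B (Python) =====
-- def optimize_dockerfile_content(content: str, component: str) -> str:
--     """Single forward pass with a run-buffer accumulator instead of index + inner look-ahead."""
--     out = []
--     run_buffer = []
--
--     def flush():
--         if not run_buffer:
--             return
--         if len(run_buffer) == 1:
--             out.append(run_buffer[0])
--         else:
--             out.append("RUN " + " && \\\n    ".join(cmd[4:].strip() for cmd in run_buffer))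
--         run_buffer.clear()
--
--     for raw in content.splitlines():
--         line = raw.strip()
--         if line.startswith("RUN"):
--             run_buffer.append(line)
--         else:
--             flush()
--             out.append(line)
--     flush()
--
--     body = "\n".join(out)
--
--     if component == "frontend":
--         if "npm ci" in body and "--cache-folder" not in body:
--             body = body.replace("npm ci", "npm ci --cache /npm-cache")
--         if "npm ci" in body and "rm -rf /root/.npm" not in body:
--             body = body.replace("npm ci", "npm ci && rm -rf /root/.npm")
--     else:
--         if "pip install" in body and "rm -rf /root/.cache/pip" not in body:
--             body = body.replace("pip install", "pip install --no-cache-dir")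
--         if "python:3.9" in body and "slim" not in body:
--             body = body.replace("python:3.9", "python:3.9-slim")
--
--     header_comment = """# 优化的Dockerfile
-- # 已应用以下优化:
-- # 1. 合并RUN命令减少层数
-- # 2. 优化缓存使用
-- # 3. 清理构建缓存
-- # 4. 使用最小基础镜像
-- """
--     dockerignore_suggestion = """
-- # 推荐的.dockerignore配置:
-- # .git
-- # node_modules
-- # npm-debug.log
-- # Dockerfile
-- # .dockerignore
-- # .env
-- # .env.*
-- # *.md
-- # .vscode
-- # .idea
-- """
--     return header_comment + body + dockerignore_suggestion
-- ===== Notes on version B (the rewrite author's own statement) =====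
-- stated objective: simpler
-- what changed: The RUN-merging core is rewritten as a single forward pass with a run-buffer accumulator that is flushed at each non-RUN line and once at the end, replacing A's index-driven outer loop with an inner look-ahead scan that re-collects consecutive RUN lines; the header/footer and component-specific replace blocks are unchanged.
import Mathlib
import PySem

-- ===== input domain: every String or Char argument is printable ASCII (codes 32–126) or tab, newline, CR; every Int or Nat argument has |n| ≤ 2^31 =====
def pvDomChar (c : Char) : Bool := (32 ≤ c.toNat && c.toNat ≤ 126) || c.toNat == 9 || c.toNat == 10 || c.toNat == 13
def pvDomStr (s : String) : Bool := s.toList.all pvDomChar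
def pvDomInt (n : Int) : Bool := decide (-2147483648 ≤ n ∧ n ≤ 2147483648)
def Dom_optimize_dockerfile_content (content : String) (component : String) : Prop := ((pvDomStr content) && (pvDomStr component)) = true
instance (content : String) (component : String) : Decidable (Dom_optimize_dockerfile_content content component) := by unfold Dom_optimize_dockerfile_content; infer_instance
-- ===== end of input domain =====

-- B replaces A's index-with-inner-look-ahead RUN merging by a single forward pass with a
-- run-buffer accumulator (objective: simpler decomposition; same text optimizations afterwards).

-- Helpers shared by both ports (identical Python text in A and B):
-- line[4:].strip()
def pvStripSlice4 (s : String) : String := PySem.Str.strip (PySem.Str.slice s (some 4) none)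

-- the component-specific replace blocks + header/footer, byte-for-byte the same in A and B
def pvHeader : String := "# 优化的Dockerfile\n# 已应用以下优化:\n# 1. 合并RUN命令减少层数\n# 2. 优化缓存使用\n# 3. 清理构建缓存\n# 4. 使用最小基础镜像\n"
def pvFooter : String := "\n# 推荐的.dockerignore配置:\n# .git\n# node_modules\n# npm-debug.log\n# Dockerfile\n# .dockerignore\n# .env\n# .env.*\n# *.md\n# .vscode\n# .idea\n"

def pvPostprocess (body0 : String) (component : String) : String :=
  let body :=
    if component == "frontend" then
      let b1 :=
        if PySem.Str.isIn "npm ci" body0 && !PySem.Str.isIn "--cache-folder" body0 then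
          PySem.Str.replace body0 "npm ci" "npm ci --cache /npm-cache"
        else body0
      if PySem.Str.isIn "npm ci" b1 && !PySem.Str.isIn "rm -rf /root/.npm" b1 then
        PySem.Str.replace b1 "npm ci" "npm ci && rm -rf /root/.npm"
      else b1
    else
      let b1 :=
        if PySem.Str.isIn "pip install" body0 && !PySem.Str.isIn "rm -rf /root/.cache/pip" body0 then
          PySem.Str.replace body0 "pip install" "pip install --no-cache-dir"
        else body0
      if PySem.Str.isIn "python:3.9" b1 && !PySem.Str.isIn "slim" b1 then
        PySem.Str.replace b1 "python:3.9" "python:3.9-slim"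
      else b1
  pvHeader ++ body ++ pvFooter

-- ===== PORT A =====
-- A's inner `while j < len(lines) and lines[j].strip().startswith("RUN")` look-ahead:
-- returns (the collected stripped commands, the remaining lines from index j on)
def pvCollectRuns : List String → List String × List String
  | [] => ([], [])
  | l :: rest =>
    if PySem.Str.startswith (PySem.Str.strip l) "RUN" then
      let p := pvCollectRuns rest
      (pvStripSlice4 (PySem.Str.strip l) :: p.1, p.2)
    else ([], l :: rest)

theorem pvCollectRuns_len (xs : List String) : (pvCollectRuns xs).2.length ≤ xs.length := by
  induction xs with
  | nil => simp [pvCollectRuns]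
  | cons l rest ih =>
    simp only [pvCollectRuns]
    split
    · simpa using Nat.le_succ_of_le ih
    · simp

-- A's outer `while i < len(lines)` loop
def pvMergeA : List String → List String
  | [] => []
  | l :: rest =>
    let line := PySem.Str.strip l
    if PySem.Str.startswith line "RUN" then
      let run_commands := pvStripSlice4 line :: (pvCollectRuns rest).1
      if 1 < run_commands.length then
        ("RUN " ++ PySem.Str.join " && \\\n    " run_commands) :: pvMergeA (pvCollectRuns rest).2
      else
        line :: pvMergeA rest
    else
      line :: pvMergeA rest
termination_by xs => xs.length
decreasing_by
  · exact Nat.lt_succ_of_le (pvCollectRuns_len rest)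
  · exact Nat.lt_succ_self _
  · exact Nat.lt_succ_self _

def optimize_dockerfile_content (content : String) (component : String) : String :=
  pvPostprocess (PySem.Str.join "\n" (pvMergeA (PySem.Str.splitlines content))) component

-- ===== PORT B =====
def pvFlush (buf : List String) : List String :=
  match buf with
  | [] => []
  | [x] => [x]
  | _ => ["RUN " ++ PySem.Str.join " && \\\n    " (buf.map pvStripSlice4)]

def pvBLoop (buf : List String) : List String → List String
  | [] => pvFlush buf
  | raw :: rest =>
    let line := PySem.Str.strip raw
    if PySem.Str.startswith line "RUN" then
      pvBLoop (buf ++ [line]) rest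
    else
      pvFlush buf ++ line :: pvBLoop [] rest

def optimize_dockerfile_content_alt (content : String) (component : String) : String :=
  pvPostprocess (PySem.Str.join "\n" (pvBLoop [] (PySem.Str.splitlines content))) component

-- ===== PRECONDITION & SPEC =====
def Spec_optimize_dockerfile_content (content : String) (component : String) (out : String) : Prop := out = optimize_dockerfile_content_alt content component
instance (content : String) (component : String) (out : String) : Decidable (Spec_optimize_dockerfile_content content component out) := by unfold Spec_optimize_dockerfile_content; infer_instance

-- ===== CLAIM (what is proved, stated in full; the proofs are below) =====
def Claim_equal_optimize_dockerfile_content : Prop := ∀ (content : String) (component : String), Dom_optimize_dockerfile_content content component → Spec_optimize_dockerfile_content content component (optimize_dockerfile_content content component)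

-- ===== LEMMAS AND PROOFS =====

def pvHeadNotRun : List String → Prop
  | [] => True
  | r :: _ => PySem.Str.startswith (PySem.Str.strip r) "RUN" = false

theorem pvCR_pos (l : String) (rest : List String)
    (h : PySem.Str.startswith (PySem.Str.strip l) "RUN" = true) :
    pvCollectRuns (l :: rest) =
      (pvStripSlice4 (PySem.Str.strip l) :: (pvCollectRuns rest).1, (pvCollectRuns rest).2) := by
  simp only [pvCollectRuns]; rw [if_pos h]

theorem pvCR_neg (l : String) (rest : List String)
    (h : PySem.Str.startswith (PySem.Str.strip l) "RUN" = false) :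
    pvCollectRuns (l :: rest) = ([], l :: rest) := by
  simp only [pvCollectRuns]; rw [if_neg (by rw [h]; decide)]

theorem pvMergeA_nil : pvMergeA [] = [] := by simp [pvMergeA]

theorem pvMergeA_cons_pos (l : String) (rest : List String)
    (h : PySem.Str.startswith (PySem.Str.strip l) "RUN" = true) :
    pvMergeA (l :: rest) =
      if 1 < (pvStripSlice4 (PySem.Str.strip l) :: (pvCollectRuns rest).1).length then
        ("RUN " ++ PySem.Str.join " && \\\n    "
          (pvStripSlice4 (PySem.Str.strip l) :: (pvCollectRuns rest).1)) :: pvMergeA (pvCollectRuns rest).2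
      else PySem.Str.strip l :: pvMergeA rest := by
  rw [pvMergeA]; rw [if_pos h]

theorem pvMergeA_cons_neg (l : String) (rest : List String)
    (h : PySem.Str.startswith (PySem.Str.strip l) "RUN" = false) :
    pvMergeA (l :: rest) = PySem.Str.strip l :: pvMergeA rest := by
  rw [pvMergeA]; rw [if_neg (by rw [h]; decide)]

theorem pvBLoop_nil (buf : List String) : pvBLoop buf [] = pvFlush buf := rfl

theorem pvFlush_two (x y : String) (zs : List String) :
    pvFlush (x :: y :: zs) =
      ["RUN " ++ PySem.Str.join " && \\\n    " ((x :: y :: zs).map pvStripSlice4)] := rfl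

theorem pvBLoop_cons_pos (buf : List String) (raw : String) (rest : List String)
    (h : PySem.Str.startswith (PySem.Str.strip raw) "RUN" = true) :
    pvBLoop buf (raw :: rest) = pvBLoop (buf ++ [PySem.Str.strip raw]) rest := by
  simp only [pvBLoop]; rw [if_pos h]

theorem pvBLoop_cons_neg (buf : List String) (raw : String) (rest : List String)
    (h : PySem.Str.startswith (PySem.Str.strip raw) "RUN" = false) :
    pvBLoop buf (raw :: rest) = pvFlush buf ++ PySem.Str.strip raw :: pvBLoop [] rest := by
  simp only [pvBLoop]; rw [if_neg (by rw [h]; decide)]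

theorem pvCollectRuns_spec (xs : List String) :
    ∃ pre, xs = pre ++ (pvCollectRuns xs).2 ∧
      (pvCollectRuns xs).1 = pre.map (fun l => pvStripSlice4 (PySem.Str.strip l)) ∧
      (∀ l ∈ pre, PySem.Str.startswith (PySem.Str.strip l) "RUN" = true) ∧
      pvHeadNotRun (pvCollectRuns xs).2 := by
  induction xs with
  | nil => exact ⟨[], by simp [pvCollectRuns, pvHeadNotRun]⟩
  | cons l rest ih =>
    by_cases h : PySem.Str.startswith (PySem.Str.strip l) "RUN" = true
    · obtain ⟨pre, h1, h2, h3, h4⟩ := ih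
      refine ⟨l :: pre, ?_, ?_, ?_, ?_⟩
      · rw [pvCR_pos l rest h]; simpa using h1
      · rw [pvCR_pos l rest h]; simp [h2]
      · intro x hx
        rcases List.mem_cons.mp hx with hx | hx
        · subst hx; exact h
        · exact h3 x hx
      · rw [pvCR_pos l rest h]; exact h4
    · have h' : PySem.Str.startswith (PySem.Str.strip l) "RUN" = false := by simpa using h
      refine ⟨[], ?_, ?_, ?_, ?_⟩
      · rw [pvCR_neg l rest h']; rfl
      · rw [pvCR_neg l rest h']; rfl
      · simp
      · rw [pvCR_neg l rest h']; exact h' 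

theorem pvBLoop_shift (pre : List String) (buf rem : List String)
    (h : ∀ l ∈ pre, PySem.Str.startswith (PySem.Str.strip l) "RUN" = true) :
    pvBLoop buf (pre ++ rem) = pvBLoop (buf ++ pre.map PySem.Str.strip) rem := by
  induction pre generalizing buf with
  | nil => simp
  | cons l pre ih =>
    have hl := h l (by simp)
    rw [List.cons_append, pvBLoop_cons_pos _ _ _ hl, ih _ (fun x hx => h x (by simp [hx])),
      List.append_assoc]
    rfl

theorem pvMain : ∀ (n : Nat) (xs : List String), xs.length ≤ n → pvBLoop [] xs = pvMergeA xs := by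
  intro n
  induction n with
  | zero =>
    intro xs h
    have hx : xs = [] := List.length_eq_zero_iff.mp (Nat.le_zero.mp h)
    subst hx; rw [pvBLoop_nil, pvMergeA_nil]; rfl
  | succ n ih =>
    intro xs h
    match xs with
    | [] => rw [pvBLoop_nil, pvMergeA_nil]; rfl
    | l :: rest =>
      have hrest : rest.length ≤ n := by simpa using h
      by_cases hR : PySem.Str.startswith (PySem.Str.strip l) "RUN" = true
      · obtain ⟨pre, h1, h2, h3, h4⟩ := pvCollectRuns_spec rest
        have hremlen : (pvCollectRuns rest).2.length ≤ n :=
          le_trans (pvCollectRuns_len rest) hrest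
        -- with the remainder not starting with RUN: pvBLoop buf rem = pvFlush buf ++ pvMergeA rem
        have tail : ∀ (buf : List String),
            pvBLoop buf (pvCollectRuns rest).2 = pvFlush buf ++ pvMergeA (pvCollectRuns rest).2 := by
          intro buf
          cases hrem : (pvCollectRuns rest).2 with
          | nil => rw [pvBLoop_nil, pvMergeA_nil, List.append_nil]
          | cons r rest' =>
            have hr : PySem.Str.startswith (PySem.Str.strip r) "RUN" = false := by
              have h4' := h4; rw [hrem] at h4'; exact h4'
            have hlen' : rest'.length ≤ n := by
              have : (r :: rest').length ≤ n := hrem ▸ hremlen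
              simp at this; omega
            rw [pvBLoop_cons_neg _ _ _ hr, ih rest' hlen', pvMergeA_cons_neg _ _ hr]
        cases hpre : pre with
        | nil =>
          subst hpre
          have hrem : (pvCollectRuns rest).2 = rest := by simpa using h1.symm
          have hrs : (pvCollectRuns rest).1 = [] := by simp [h2]
          have htail := tail [PySem.Str.strip l]
          rw [hrem] at htail
          rw [pvBLoop_cons_pos _ _ _ hR, List.nil_append, htail,
            pvMergeA_cons_pos _ _ hR, hrs, if_neg (by simp)]
          rfl
        | cons p ps =>
          subst hpre
          have hB : pvBLoop [PySem.Str.strip l] rest =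
              pvBLoop ([PySem.Str.strip l] ++ (p :: ps).map PySem.Str.strip) (pvCollectRuns rest).2 := by
            conv_lhs => rw [h1]
            exact pvBLoop_shift _ _ _ h3
          rw [pvBLoop_cons_pos _ _ _ hR, List.nil_append, hB, tail,
            pvMergeA_cons_pos _ _ hR, if_pos (by simp [h2])]
          have hflush : pvFlush ([PySem.Str.strip l] ++ (p :: ps).map PySem.Str.strip) =
              ["RUN " ++ PySem.Str.join " && \\\n    "
                (pvStripSlice4 (PySem.Str.strip l) :: (pvCollectRuns rest).1)] := by
            rw [show [PySem.Str.strip l] ++ (p :: ps).map PySem.Str.strip =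
                PySem.Str.strip l :: PySem.Str.strip p :: ps.map PySem.Str.strip from by simp,
              pvFlush_two]
            rw [h2]
            simp [List.map_map, Function.comp_def]
          rw [hflush, List.singleton_append]
      · have hR' : PySem.Str.startswith (PySem.Str.strip l) "RUN" = false := by
          simpa using hR
        rw [pvBLoop_cons_neg _ _ _ hR', ih rest hrest, pvMergeA_cons_neg _ _ hR']
        rfl

-- ===== VERDICT (by name: the statement is the Claim_ definition above) =====
theorem optimize_dockerfile_content_spec : Claim_equal_optimize_dockerfile_content := by
  intro content component _
  unfold Spec_optimize_dockerfile_content optimize_dockerfile_content optimize_dockerfile_content_alt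
  rw [pvMain (PySem.Str.splitlines content).length _ le_rfl]
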